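-- pv_equiv track=rewrite | github.com/Sudip2217/LeetCode | 2685-first-completely-painted-row-or-column/2685-first-completely-painted-row-or-column.py | firstCompleteIndex
-- ===== SOURCE A (Python) =====
-- from typing import List
--
-- def firstCompleteIndex(arr: List[int], mat: List[List[int]]) -> int:
--     rows, cols = len(mat), len(mat[0])
--     row_paint = [0] * rows
--     col_paint = [0] * cols
--     position = {mat[i][j]: (i, j) for i in range(rows) for j in range(cols)}
--
--     for idx, num in enumerate(arr):
--         i, j = position[num]
--         row_paint[i] += 1
--         col_paint[j] += 1
--         if row_paint[i] == cols or col_paint[j] == rows: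
--             return idx
--     return -1
-- ===== SOURCE B (Python) =====
-- from typing import List
--
-- def firstCompleteIndex(arr: List[int], mat: List[List[int]]) -> int:
--     # Instead of simulating the painting with counters and an early return:
--     # collect, per row and per column, the list of paint times of its cells'
--     # hits; a line completes at its (size)-th hit, and the answer is the
--     # minimum completion time over all lines (-1 if no line ever completes).
--     rows, cols = len(mat), len(mat[0])
--     position = {mat[i][j]: (i, j) for i in range(rows) for j in range(cols)}
--     row_hits = [[] for _ in range(rows)]
--     col_hits = [[] for _ in range(cols)]
--     for idx, num in enumerate(arr):
--         i, j = position[num]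
--         row_hits[i].append(idx)
--         col_hits[j].append(idx)
--     candidates = [h[cols - 1] for h in row_hits if len(h) >= cols]
--     candidates += [h[rows - 1] for h in col_hits if len(h) >= rows]
--     return min(candidates, default=-1)
-- ===== Notes on version B (the rewrite author's own statement) =====
-- stated objective: alternative
-- what changed: Instead of simulating the painting step by step with row/column counters and an early return, B gathers per row and per column the list of its hit times, takes each line's (size)-th hit as its completion time, and returns the minimum over all lines (-1 if no line completes).
-- outside the precondition, e.g. on firstCompleteIndex([7, 7, 3], [[7, 2], [5, 2, 6, 7], [4, 5], [7, 1, 8]]): A returns 1, B raises KeyError; on firstCompleteIndex([], [[]]): A returns -1, B raises IndexError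
import Mathlib
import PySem

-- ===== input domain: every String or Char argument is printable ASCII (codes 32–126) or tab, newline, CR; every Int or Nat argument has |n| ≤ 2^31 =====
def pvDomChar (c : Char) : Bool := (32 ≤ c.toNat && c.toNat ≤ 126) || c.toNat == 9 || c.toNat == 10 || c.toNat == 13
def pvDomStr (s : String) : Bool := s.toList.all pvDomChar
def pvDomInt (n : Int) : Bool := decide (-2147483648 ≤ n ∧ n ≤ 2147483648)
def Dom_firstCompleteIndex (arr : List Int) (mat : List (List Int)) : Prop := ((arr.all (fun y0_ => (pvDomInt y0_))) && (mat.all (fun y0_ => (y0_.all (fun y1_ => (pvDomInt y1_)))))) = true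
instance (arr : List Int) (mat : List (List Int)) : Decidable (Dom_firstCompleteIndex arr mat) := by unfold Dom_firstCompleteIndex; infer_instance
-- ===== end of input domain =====

-- B replaces A's step-by-step painting simulation (row/column counters with an
-- early return) by a gather-then-select computation: per line the list of its
-- hit times, each line completes at its (size)-th hit, answer = min over lines.

-- ===== PORT A =====
-- mat[i][j] for in-range i, j (Pre_ keeps every access of the ports in range)
def pvCell (mat : List (List Int)) (i j : Nat) : Int := (mat.getD i []).getD j 0

-- position = {mat[i][j]: (i, j) for i in range(rows) for j in range(cols)}
def pvPosition (mat : List (List Int)) (rows cols : Nat) : PySem.Dict Int (Nat × Nat) :=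
  (List.range rows).foldl
    (fun d i => (List.range cols).foldl (fun d j => d.insert (pvCell mat i j) (i, j)) d)
    PySem.Dict.empty

-- the 'for idx, num in enumerate(arr)' loop with its counter lists and early return
def pvLoopA (position : PySem.Dict Int (Nat × Nat)) (rows cols : Nat) :
    List Int → Nat → List Nat → List Nat → Int
  | [], _, _, _ => -1
  | v :: rest, idx, rp, cp =>
    match position.get? v with
    | none => -1   -- Python raises KeyError here; Pre_ excludes such inputs
    | some (i, j) =>
      let rp1 := rp.set i (rp.getD i 0 + 1)
      let cp1 := cp.set j (cp.getD j 0 + 1)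
      if rp1.getD i 0 = cols ∨ cp1.getD j 0 = rows then (idx : Int)
      else pvLoopA position rows cols rest (idx + 1) rp1 cp1

def firstCompleteIndex (arr : List Int) (mat : List (List Int)) : Int :=
  let rows := mat.length
  let cols := (mat.headI).length   -- len(mat[0]); Pre_ requires mat ≠ []
  pvLoopA (pvPosition mat rows cols) rows cols arr 0
    (List.replicate rows 0) (List.replicate cols 0)

-- ===== PORT B =====
-- Source B builds the same 'position' comprehension, so its port shares pvPosition.
-- the gather loop
def pvHits (position : PySem.Dict Int (Nat × Nat)) :
    List Int → Nat → List (List Nat) → List (List Nat) → List (List Nat) × List (List Nat)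
  | [], _, rh, ch => (rh, ch)
  | v :: rest, idx, rh, ch =>
    match position.get? v with
    | none => (rh, ch)   -- Python raises KeyError here; Pre_ excludes such inputs
    | some (i, j) =>
      pvHits position rest (idx + 1)
        (rh.set i (rh.getD i [] ++ [idx])) (ch.set j (ch.getD j [] ++ [idx]))

def firstCompleteIndex_alt (arr : List Int) (mat : List (List Int)) : Int :=
  let rows := mat.length
  let cols := (mat.headI).length
  let position := pvPosition mat rows cols
  let hits := pvHits position arr 0 (List.replicate rows []) (List.replicate cols [])
  -- h[cols-1] / h[rows-1]: Pre_ gives cols ≥ 1, rows ≥ 1, so the index is the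
  -- plain (threshold-1)-th element of a long-enough list
  let cands := ((hits.1.filter (fun h => cols ≤ h.length)).map (fun h => (h.getD (cols - 1) 0 : Int)))
            ++ ((hits.2.filter (fun h => rows ≤ h.length)).map (fun h => (h.getD (rows - 1) 0 : Int)))
  PySem.List.minD cands (fun x => x) (-1)

-- ===== PRECONDITION & SPEC =====
-- Pre_ excludes exactly: (a) inputs where A raises (empty mat, a row shorter than
-- mat[0] that range(cols) indexing hits, an arr value outside the indexed cells
-- that A's loop reaches — IndexError/KeyError); (b) an arr value outside the
-- indexed cells that A never reaches because a line completes first (there A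
-- returns the completion time but B, which reads all of arr, raises KeyError);
-- and (c) mat[0] empty with arr empty, where A returns -1 but B's h[cols-1]
-- raises IndexError.
def Pre_firstCompleteIndex (arr : List Int) (mat : List (List Int)) : Prop :=
  mat ≠ [] ∧ (mat.headI) ≠ [] ∧ (∀ r ∈ mat, (mat.headI).length ≤ r.length) ∧
  ∀ v ∈ arr, v ∈ (mat.map (fun r => r.take (mat.headI).length)).flatten
instance (arr : List Int) (mat : List (List Int)) : Decidable (Pre_firstCompleteIndex arr mat) := by
  unfold Pre_firstCompleteIndex; infer_instance

def pvWitness_firstCompleteIndex : List Int × List (List Int) :=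
  ([1, 4, 3, 2], [[1, 2], [3, 4]])

def Spec_firstCompleteIndex (arr : List Int) (mat : List (List Int)) (out : Int) : Prop := out = firstCompleteIndex_alt arr mat
instance (arr : List Int) (mat : List (List Int)) (out : Int) : Decidable (Spec_firstCompleteIndex arr mat out) := by unfold Spec_firstCompleteIndex; infer_instance

-- ===== CLAIM (what is proved, stated in full; the proofs are below) =====
def Claim_equal_firstCompleteIndex : Prop := ∀ (arr : List Int) (mat : List (List Int)), Dom_firstCompleteIndex arr mat → Pre_firstCompleteIndex arr mat → Spec_firstCompleteIndex arr mat (firstCompleteIndex arr mat)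

-- ===== LEMMAS AND PROOFS =====

def pvPairs (mat : List (List Int)) (rows cols : Nat) : List (Int × (Nat × Nat)) :=
  (List.range rows).flatMap (fun i => (List.range cols).map (fun j => (pvCell mat i j, (i, j))))

-- row-hit / column-hit predicates: does step k paint a cell of row i / column j
def pvQr (pos : PySem.Dict Int (Nat × Nat)) (arr : List Int) (i k : Nat) : Bool :=
  match pos.get? (arr.getD k 0) with
  | some p => p.1 == i
  | none => false

def pvQc (pos : PySem.Dict Int (Nat × Nat)) (arr : List Int) (j k : Nat) : Bool :=
  match pos.get? (arr.getD k 0) with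
  | some p => p.2 == j
  | none => false

-- generic fold bounds
theorem pv_le_foldl_min (l : List Int) (a t : Int) (h : t ≤ a) (h2 : ∀ x ∈ l, t ≤ x) :
    t ≤ l.foldl min a := by
  induction l generalizing a with
  | nil => exact h
  | cons x xs ih =>
    exact ih _ (le_min h (h2 x (by simp))) (fun y hy => h2 y (by simp [hy]))

-- small list facts
theorem pv_getD_mem_of_lt {a : Type} (mat : List a) (dflt : a) (i : Nat) (h : i < mat.length) :
    mat.getD i dflt ∈ mat := by
  rw [List.getD_eq_getElem _ _ h]; exact List.getElem_mem h

theorem pv_replicate_getD {a : Type} (x dflt : a) (n i : Nat) (h : i < n) :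
    (List.replicate n x).getD i dflt = x := by
  rw [List.getD_eq_getElem _ _ (by simpa using h)]
  simp

theorem pv_set_getD_self {a : Type} (l : List a) (i : Nat) (x dflt : a) (h : i < l.length) :
    (l.set i x).getD i dflt = x := by
  rw [List.getD_eq_getElem _ _ (by simpa using h)]
  exact List.getElem_set_self _

theorem pv_set_getD_ne {a : Type} (l : List a) (i i' : Nat) (x dflt : a) (h : i ≠ i') :
    (l.set i x).getD i' dflt = l.getD i' dflt := by
  by_cases h' : i' < l.length
  · rw [List.getD_eq_getElem _ _ (by simpa using h'), List.getD_eq_getElem _ _ h']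
    exact List.getElem_set_ne h _
  · rw [List.getD_eq_default _ _ (by simpa using Nat.le_of_not_lt h'),
        List.getD_eq_default _ _ (Nat.le_of_not_lt h')]

theorem pv_take_repr {a : Type} (dflt : a) (l : List a) (c : Nat) (h : c ≤ l.length) :
    (List.range c).map (fun j => l.getD j dflt) = l.take c := by
  apply List.ext_getElem
  · simp [Nat.min_eq_left h]
  · intro m h1 h2
    simp only [List.getElem_map, List.getElem_range, List.getElem_take]
    rw [List.getD_eq_getElem _ _ (by simp at h1; omega)]

theorem pv_flatten_repr (mat : List (List Int)) :
    mat.flatten = (List.range mat.length).flatMap (fun i => mat.getD i []) := by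
  conv_lhs => rw [show mat = (List.range mat.length).map (fun j => mat.getD j []) from
    by rw [pv_take_repr ([] : List Int) mat mat.length le_rfl]; simp]
  rw [List.flatMap_def]

-- helpers about arr.drop
theorem pv_drop_lt (arr : List Int) (t : Nat) (v : Int) (rest : List Int)
    (h : arr.drop t = v :: rest) : t < arr.length := by
  by_contra hc
  rw [List.drop_eq_nil_iff.mpr (by omega)] at h
  simp at h

theorem pv_drop_head (arr : List Int) (t : Nat) (v : Int) (rest : List Int)
    (h : arr.drop t = v :: rest) (ht : t < arr.length) : arr[t] = v := by
  have h0 : (arr.drop t)[0]? = some v := by rw [h]; rfl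
  rw [List.getElem?_drop] at h0
  have : arr[t+0]? = some arr[t] := List.getElem?_eq_getElem (by omega)
  rw [h0] at this
  exact (Option.some_injective _ this).symm

theorem pv_drop_succ (arr : List Int) (t : Nat) (v : Int) (rest : List Int)
    (h : arr.drop t = v :: rest) : arr.drop (t+1) = rest := by
  rw [← List.drop_drop (i := 1) (j := t), h]
  simp

theorem pv_pos_eq_pairs (mat : List (List Int)) (rows cols : Nat) :
    pvPosition mat rows cols = (pvPairs mat rows cols).foldl (fun d p => d.insert p.1 p.2) PySem.Dict.empty := by
  unfold pvPosition pvPairs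
  rw [List.foldl_flatMap]
  congr 1
  funext d i
  rw [List.foldl_map]

-- a successful lookup comes from one of the inserted pairs
theorem pv_foldl_insert_sound (ps : List (Int × (Nat × Nat))) (k : Int) (p : Nat × Nat) :
    ∀ (d : PySem.Dict Int (Nat × Nat)),
    (ps.foldl (fun d p => d.insert p.1 p.2) d).get? k = some p →
    (k, p) ∈ ps ∨ d.get? k = some p := by
  induction ps with
  | nil => intro d h; exact Or.inr h
  | cons q rest ih =>
    intro d h
    rcases ih _ h with h1 | h1
    · exact Or.inl (by simp [h1])
    · rw [PySem.Dict.get?_insert] at h1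
      by_cases hk : k = q.1
      · rw [if_pos hk] at h1
        have hp : p = q.2 := (Option.some_injective _ h1).symm
        left
        rw [hk, hp]
        exact List.mem_cons_self
      · rw [if_neg hk] at h1
        exact Or.inr h1

-- a key among the inserted pairs is found
theorem pv_foldl_insert_isSome (ps : List (Int × (Nat × Nat))) (k : Int) :
    ∀ (d : PySem.Dict Int (Nat × Nat)),
    (k ∈ ps.map (·.1) ∨ (d.get? k).isSome) →
    ((ps.foldl (fun d p => d.insert p.1 p.2) d).get? k).isSome := by
  induction ps with
  | nil => intro d h; simpa using h
  | cons q rest ih =>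
    intro d h
    apply ih
    rw [PySem.Dict.get?_insert]
    by_cases hk : k = q.1
    · rw [if_pos hk]; simp
    · rw [if_neg hk]
      rcases h with h | h
      · rcases List.mem_map.mp h with ⟨p, hp, hpk⟩
        rcases List.mem_cons.mp hp with rfl | hp'
        · exact absurd hpk.symm hk
        · exact Or.inl (hpk ▸ List.mem_map_of_mem (f := (·.1)) hp')
      · exact Or.inr h

theorem pv_pairs_keys (mat : List (List Int)) (cols : Nat)
    (hwide : ∀ r ∈ mat, cols ≤ r.length) :
    (pvPairs mat mat.length cols).map (·.1) =
      (mat.map (fun r => r.take cols)).flatten := by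
  unfold pvPairs
  rw [List.map_flatMap]
  have hrepr : (mat.map (fun r => r.take cols)).flatten =
      (List.range mat.length).flatMap (fun i => (mat.getD i []).take cols) := by
    rw [pv_flatten_repr (mat.map (fun r => r.take cols))]
    simp only [List.length_map]
    apply List.flatMap_congr
    intro i hi
    rw [List.getD_eq_getElem _ _ (by simpa using hi), List.getElem_map,
      ← List.getD_eq_getElem _ _ (by simpa using hi)]
  rw [hrepr]
  apply List.flatMap_congr
  intro i hi
  rw [List.map_map]
  exact pv_take_repr 0 _ _ (hwide _ (pv_getD_mem_of_lt _ _ _ (by simpa using hi)))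

theorem pv_mem_pairs_bounds (mat : List (List Int)) (cols : Nat) (v : Int) (i j : Nat)
    (h : (v, (i, j)) ∈ pvPairs mat mat.length cols) :
    i < mat.length ∧ j < cols := by
  unfold pvPairs at h
  rcases List.mem_flatMap.mp h with ⟨i', hi', hmem⟩
  rcases List.mem_map.mp hmem with ⟨j', hj', heq⟩
  have hij : i' = i ∧ j' = j := by
    have h1 := congrArg (fun p => p.2.1) heq
    have h2 := congrArg (fun p => p.2.2) heq
    exact ⟨h1, h2⟩
  rcases hij with ⟨rfl, rfl⟩
  exact ⟨by simpa using hi', by simpa using hj'⟩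

-- inside Pre_, every arr value has an in-range position
theorem pv_lookup (arr : List Int) (mat : List (List Int))
    (hwide : ∀ r ∈ mat, (mat.headI).length ≤ r.length)
    (harr : ∀ v ∈ arr, v ∈ (mat.map (fun r => r.take (mat.headI).length)).flatten)
    (v : Int) (hv : v ∈ arr) :
    ∃ i j, i < mat.length ∧ j < (mat.headI).length ∧
      (pvPosition mat mat.length (mat.headI).length).get? v = some (i, j) := by
  have hkey : v ∈ (pvPairs mat mat.length (mat.headI).length).map (·.1) := by
    rw [pv_pairs_keys mat _ hwide]
    exact harr v hv
  have hsome := pv_foldl_insert_isSome _ v PySem.Dict.empty (Or.inl hkey)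
  rw [← pv_pos_eq_pairs] at hsome
  rcases Option.isSome_iff_exists.mp hsome with ⟨⟨i, j⟩, hget⟩
  have hmem : (v, (i, j)) ∈ pvPairs mat mat.length (mat.headI).length := by
    have := pv_foldl_insert_sound _ v (i, j) PySem.Dict.empty (by rw [← pv_pos_eq_pairs]; exact hget)
    rcases this with h | h
    · exact h
    · simp [PySem.Dict.get?_empty] at h
  rcases pv_mem_pairs_bounds mat _ v i j hmem with ⟨hi, hj⟩
  exact ⟨i, j, hi, hj, hget⟩

-- range/filter counting helpers
theorem pv_filter_range_succ_true (q : Nat → Bool) (t : Nat) (h : q t = true) :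
    (List.range (t+1)).filter q = (List.range t).filter q ++ [t] := by
  rw [List.range_succ, List.filter_append]
  simp [h]

theorem pv_filter_range_succ_false (q : Nat → Bool) (t : Nat) (h : q t = false) :
    (List.range (t+1)).filter q = (List.range t).filter q := by
  rw [List.range_succ, List.filter_append]
  simp [h]

theorem pv_filter_range_split (q : Nat → Bool) (t n : Nat) (h : t ≤ n) :
    (List.range n).filter q =
      (List.range t).filter q ++ ((List.range (n - t)).map (t + ·)).filter q := by
  rw [← List.filter_append, ← List.range_add, Nat.add_sub_cancel' h]

-- the gather loop of B: each final hit list is the filtered time range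
theorem pv_hits_spec (pos : PySem.Dict Int (Nat × Nat)) (arr : List Int) (rows cols : Nat)
    (hsome : ∀ v ∈ arr, (pos.get? v).isSome = true) :
    ∀ (rest : List Int) (t : Nat) (rh ch : List (List Nat)),
    arr.drop t = rest → t ≤ arr.length →
    rh.length = rows → ch.length = cols →
    (∀ i, i < rows → rh.getD i [] = (List.range t).filter (pvQr pos arr i)) →
    (∀ j, j < cols → ch.getD j [] = (List.range t).filter (pvQc pos arr j)) →
    (pvHits pos rest t rh ch).1.length = rows ∧
    (pvHits pos rest t rh ch).2.length = cols ∧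
    (∀ i, i < rows → (pvHits pos rest t rh ch).1.getD i [] =
      (List.range arr.length).filter (pvQr pos arr i)) ∧
    (∀ j, j < cols → (pvHits pos rest t rh ch).2.getD j [] =
      (List.range arr.length).filter (pvQc pos arr j)) := by
  intro rest
  induction rest with
  | nil =>
    intro t rh ch hdrop ht2 hlr hlc hir hic
    have ht : arr.length ≤ t := by
      by_contra hc
      rw [List.drop_eq_nil_iff] at hdrop
      omega
    have : t = arr.length := le_antisymm ht2 ht
    subst this
    exact ⟨hlr, hlc, hir, hic⟩
  | cons v rest ih =>
    intro t rh ch hdrop _ hlr hlc hir hic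
    have ht : t < arr.length := pv_drop_lt arr t v rest hdrop
    have hvt : arr[t]? = some v := by
      rw [List.getElem?_eq_getElem ht]
      exact congrArg some (pv_drop_head arr t v rest hdrop ht)
    have hva : v ∈ arr := by
      have hmemv := List.getElem_mem ht
      have hv' : arr[t] = v := by
        have := List.getElem?_eq_getElem ht
        rw [hvt] at this
        exact (Option.some_injective _ this).symm
      rwa [hv'] at hmemv
    rw [pvHits]
    cases hget : pos.get? v with
    | none =>
      have hbad := hsome v hva
      rw [hget] at hbad
      simp at hbad
    | some p =>
      rcases p with ⟨i, j⟩
      apply ih (t+1) _ _ (pv_drop_succ arr t v rest hdrop) (by omega) (by simpa using hlr)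
        (by simpa using hlc)
      · intro i' hi'
        by_cases hii : i = i'
        · subst hii
          rw [pv_set_getD_self _ _ _ _ (by rw [hlr]; exact hi'), hir i hi',
            pv_filter_range_succ_true]
          simp [pvQr, hvt, hget]
        · rw [pv_set_getD_ne _ _ _ _ _ hii, hir i' hi', pv_filter_range_succ_false]
          simp [pvQr, hvt, hget]
          exact hii
      · intro j' hj'
        by_cases hjj : j = j'
        · subst hjj
          rw [pv_set_getD_self _ _ _ _ (by rw [hlc]; exact hj'), hic j hj',
            pv_filter_range_succ_true]
          simp [pvQc, hvt, hget]
        · rw [pv_set_getD_ne _ _ _ _ _ hjj, hic j' hj', pv_filter_range_succ_false]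
          simp [pvQc, hvt, hget]
          exact hjj

-- the final hit lists, and B's candidate list, in closed form
def pvHR (arr : List Int) (mat : List (List Int)) (i : Nat) : List Nat :=
  (List.range arr.length).filter (pvQr (pvPosition mat mat.length (mat.headI).length) arr i)

def pvHC (arr : List Int) (mat : List (List Int)) (j : Nat) : List Nat :=
  (List.range arr.length).filter (pvQc (pvPosition mat mat.length (mat.headI).length) arr j)

def pvCands (arr : List Int) (mat : List (List Int)) : List Int :=
  ((((List.range mat.length).map (pvHR arr mat)).filter
      (fun h => (mat.headI).length ≤ h.length)).map
      (fun h => (h.getD ((mat.headI).length - 1) 0 : Int)))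
  ++ ((((List.range (mat.headI).length).map (pvHC arr mat)).filter
      (fun h => mat.length ≤ h.length)).map
      (fun h => (h.getD (mat.length - 1) 0 : Int)))

theorem pv_alt_eq (arr : List Int) (mat : List (List Int))
    (hwide : ∀ r ∈ mat, (mat.headI).length ≤ r.length)
    (harr : ∀ v ∈ arr, v ∈ (mat.map (fun r => r.take (mat.headI).length)).flatten) :
    firstCompleteIndex_alt arr mat = PySem.List.minD (pvCands arr mat) (fun x => x) (-1) := by
  have hsome : ∀ v ∈ arr,
      ((pvPosition mat mat.length (mat.headI).length).get? v).isSome = true := by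
    intro v hv
    obtain ⟨i, j, _, _, hget⟩ := pv_lookup arr mat hwide harr v hv
    rw [hget]
    rfl
  have hs := pv_hits_spec (pvPosition mat mat.length (mat.headI).length) arr
    mat.length (mat.headI).length hsome arr 0
    (List.replicate mat.length []) (List.replicate (mat.headI).length [])
    List.drop_zero (Nat.zero_le _) (by simp) (by simp)
    (fun i hi => by rw [pv_replicate_getD _ _ _ _ hi]; simp)
    (fun j hj => by rw [pv_replicate_getD _ _ _ _ hj]; simp)
  rcases hs with ⟨hl1, hl2, hg1, hg2⟩
  have h1 : (pvHits (pvPosition mat mat.length (mat.headI).length) arr 0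
      (List.replicate mat.length []) (List.replicate (mat.headI).length [])).1 =
      (List.range mat.length).map (pvHR arr mat) := by
    apply List.ext_getElem
    · simp [hl1]
    · intro m hm1 hm2
      rw [List.getElem_map, List.getElem_range,
        ← List.getD_eq_getElem _ ([] : List Nat) hm1]
      exact hg1 m (by rw [← hl1]; simpa using hm1)
  have h2 : (pvHits (pvPosition mat mat.length (mat.headI).length) arr 0
      (List.replicate mat.length []) (List.replicate (mat.headI).length [])).2 =
      (List.range (mat.headI).length).map (pvHC arr mat) := by
    apply List.ext_getElem
    · simp [hl2]
    · intro m hm1 hm2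
      rw [List.getElem_map, List.getElem_range,
        ← List.getD_eq_getElem _ ([] : List Nat) hm1]
      exact hg2 m (by rw [← hl2]; simpa using hm1)
  show PySem.List.minD _ _ _ = _
  rw [h1, h2]
  rfl

-- monotonicity of the hit count in the time bound
theorem pv_filter_range_mono (q : Nat → Bool) (n t : Nat) (h : n ≤ t) :
    ((List.range n).filter q).length ≤ ((List.range t).filter q).length := by
  rw [pv_filter_range_split q n t h]
  simp

-- reading the (c-1)-th hit at the moment the c-th hit happens
theorem pv_getD_concat (X S : List Nat) (t : Nat) :
    ((X ++ [t]) ++ S).getD X.length 0 = t := by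
  rw [List.append_assoc, List.getD_eq_getElem _ _ (by simp)]
  rw [List.getElem_append_right (by omega)]
  simp

-- a hit with position ≥ the count of hits before time t happens at time ≥ t
theorem pv_getD_late (q : Nat → Bool) (n t m : Nat) (ht : t ≤ n)
    (hm : m < ((List.range n).filter q).length)
    (hcnt : ((List.range t).filter q).length ≤ m) :
    t ≤ ((List.range n).filter q).getD m 0 := by
  have he := pv_filter_range_split q t n ht
  have hm' : m < ((List.range t).filter q ++
      ((List.range (n - t)).map (t + ·)).filter q).length := he ▸ hm
  rw [List.getD_eq_getElem _ _ hm, List.getElem_of_eq he hm,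
    List.getElem_append_right hcnt]
  have hall : ∀ x ∈ ((List.range (n - t)).map (t + ·)).filter q, t ≤ x := by
    intro x hx
    rcases List.mem_map.mp (List.mem_of_mem_filter hx) with ⟨k, _, hk⟩
    omega
  exact hall _ (List.getElem_mem _)


theorem pv_minD_eq (cands : List Int) (t : Int) (hmem : t ∈ cands) (hle : ∀ c ∈ cands, t ≤ c) :
    PySem.List.minD cands (fun x => x) (-1) = t := by
  cases cands with
  | nil => simp at hmem
  | cons c rest =>
    have hminD : PySem.List.minD (c :: rest) (fun x => x) (-1) = rest.foldl min c := by
      simp [PySem.List.minD, PySem.List.min?_id_cons]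
    rw [hminD]
    apply le_antisymm
    · rcases List.mem_cons.mp hmem with rfl | h
      · exact (PySem.List.foldl_min_le _ _).1
      · exact (PySem.List.foldl_min_le _ _).2 _ h
    · exact pv_le_foldl_min _ _ _ (hle c (by simp)) (fun x hx => hle x (by simp [hx]))

theorem pv_loop_spec (arr : List Int) (mat : List (List Int))
    (hm : mat ≠ []) (hc0 : mat.headI ≠ [])
    (hwide : ∀ r ∈ mat, (mat.headI).length ≤ r.length)
    (harr : ∀ v ∈ arr, v ∈ (mat.map (fun r => r.take (mat.headI).length)).flatten) :
    ∀ (rest : List Int) (t : Nat) (rp cp : List Nat),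
    arr.drop t = rest →
    rp.length = mat.length → cp.length = (mat.headI).length →
    (∀ i, i < mat.length → rp.getD i 0 =
      ((List.range t).filter (pvQr (pvPosition mat mat.length (mat.headI).length) arr i)).length) →
    (∀ j, j < (mat.headI).length → cp.getD j 0 =
      ((List.range t).filter (pvQc (pvPosition mat mat.length (mat.headI).length) arr j)).length) →
    (∀ i, i < mat.length →
      ((List.range t).filter (pvQr (pvPosition mat mat.length (mat.headI).length) arr i)).length < (mat.headI).length) →
    (∀ j, j < (mat.headI).length →
      ((List.range t).filter (pvQc (pvPosition mat mat.length (mat.headI).length) arr j)).length < mat.length) →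
    pvLoopA (pvPosition mat mat.length (mat.headI).length) mat.length (mat.headI).length rest t rp cp
      = PySem.List.minD (pvCands arr mat) (fun x => x) (-1) := by
  intro rest
  induction rest with
  | nil =>
    intro t rp cp hdrop hlr hlc hir hic hbr hbc
    have htn : arr.length ≤ t := by
      by_contra hcon
      rw [List.drop_eq_nil_iff] at hdrop
      omega
    have hA : ((List.range mat.length).map (pvHR arr mat)).filter
        (fun h => (mat.headI).length ≤ h.length) = [] := by
      apply List.filter_eq_nil_iff.mpr
      intro h hh
      rcases List.mem_map.mp hh with ⟨i, hi, rfl⟩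
      have hlen : (pvHR arr mat i).length < (mat.headI).length :=
        lt_of_le_of_lt (pv_filter_range_mono _ _ _ htn) (hbr i (by simpa using hi))
      simpa using Nat.not_le.mpr hlen
    have hB : ((List.range (mat.headI).length).map (pvHC arr mat)).filter
        (fun h => mat.length ≤ h.length) = [] := by
      apply List.filter_eq_nil_iff.mpr
      intro h hh
      rcases List.mem_map.mp hh with ⟨j, hj, rfl⟩
      have hlen : (pvHC arr mat j).length < mat.length :=
        lt_of_le_of_lt (pv_filter_range_mono _ _ _ htn) (hbc j (by simpa using hj))
      simpa using Nat.not_le.mpr hlen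
    have hkill : pvCands arr mat = [] := by
      unfold pvCands
      rw [hA, hB]
      rfl
    rw [hkill]
    rfl
  | cons v rest ih =>
    intro t rp cp hdrop hlr hlc hir hic hbr hbc
    have ht : t < arr.length := pv_drop_lt arr t v rest hdrop
    have hvt : arr[t]? = some v := by
      rw [List.getElem?_eq_getElem ht]
      exact congrArg some (pv_drop_head arr t v rest hdrop ht)
    have hva : v ∈ arr := by
      have hmem := List.getElem_mem ht
      rwa [pv_drop_head arr t v rest hdrop ht] at hmem
    obtain ⟨i, j, hi, hj, hget⟩ := pv_lookup arr mat hwide harr v hva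
    have hqr : pvQr (pvPosition mat mat.length (mat.headI).length) arr i t = true := by simp [pvQr, hvt, hget]
    have hqc : pvQc (pvPosition mat mat.length (mat.headI).length) arr j t = true := by simp [pvQc, hvt, hget]
    have hcr : ((List.range (t+1)).filter (pvQr (pvPosition mat mat.length (mat.headI).length) arr i)).length =
        ((List.range t).filter (pvQr (pvPosition mat mat.length (mat.headI).length) arr i)).length + 1 := by
      rw [pv_filter_range_succ_true _ _ hqr]
      simp
    have hcc : ((List.range (t+1)).filter (pvQc (pvPosition mat mat.length (mat.headI).length) arr j)).length =
        ((List.range t).filter (pvQc (pvPosition mat mat.length (mat.headI).length) arr j)).length + 1 := by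
      rw [pv_filter_range_succ_true _ _ hqc]
      simp
    have hrp1 : (rp.set i (rp.getD i 0 + 1)).getD i 0 =
        ((List.range (t+1)).filter (pvQr (pvPosition mat mat.length (mat.headI).length) arr i)).length := by
      rw [pv_set_getD_self _ _ _ _ (by rw [hlr]; exact hi), hir i hi, hcr]
    have hcp1 : (cp.set j (cp.getD j 0 + 1)).getD j 0 =
        ((List.range (t+1)).filter (pvQc (pvPosition mat mat.length (mat.headI).length) arr j)).length := by
      rw [pv_set_getD_self _ _ _ _ (by rw [hlc]; exact hj), hic j hj, hcc]
    rw [pvLoopA, hget]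
    dsimp only
    by_cases hfire : (rp.set i (rp.getD i 0 + 1)).getD i 0 = (mat.headI).length ∨
        (cp.set j (cp.getD j 0 + 1)).getD j 0 = mat.length
    · rw [if_pos hfire]
      have hmemc : (t : Int) ∈ pvCands arr mat := by
        rcases hfire with hf | hf
        · rw [hrp1] at hf
          have hX : ((List.range t).filter (pvQr (pvPosition mat mat.length (mat.headI).length) arr i)).length + 1 =
              (mat.headI).length := by rw [← hcr, hf]
          have hHR : pvHR arr mat i =
              (((List.range t).filter (pvQr (pvPosition mat mat.length (mat.headI).length) arr i)) ++ [t]) ++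
              ((List.range (arr.length - (t+1))).map ((t+1) + ·)).filter
                (pvQr (pvPosition mat mat.length (mat.headI).length) arr i) := by
            unfold pvHR
            rw [pv_filter_range_split _ (t+1) arr.length (by omega),
              pv_filter_range_succ_true _ _ hqr]
          have hlenHR : (mat.headI).length ≤ (pvHR arr mat i).length := by
            rw [hHR]
            simp
            omega
          have hgetDt : (pvHR arr mat i).getD ((mat.headI).length - 1) 0 = t := by
            rw [hHR, show (mat.headI).length - 1 =
              ((List.range t).filter (pvQr (pvPosition mat mat.length (mat.headI).length) arr i)).length from by omega,
              pv_getD_concat]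
          unfold pvCands
          apply List.mem_append_left
          apply List.mem_map.mpr
          refine ⟨pvHR arr mat i, List.mem_filter.mpr ⟨List.mem_map_of_mem (by simpa using hi), by simpa using hlenHR⟩, by rw [hgetDt]⟩
        · rw [hcp1] at hf
          have hX : ((List.range t).filter (pvQc (pvPosition mat mat.length (mat.headI).length) arr j)).length + 1 =
              mat.length := by rw [← hcc, hf]
          have hHC : pvHC arr mat j =
              (((List.range t).filter (pvQc (pvPosition mat mat.length (mat.headI).length) arr j)) ++ [t]) ++
              ((List.range (arr.length - (t+1))).map ((t+1) + ·)).filter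
                (pvQc (pvPosition mat mat.length (mat.headI).length) arr j) := by
            unfold pvHC
            rw [pv_filter_range_split _ (t+1) arr.length (by omega),
              pv_filter_range_succ_true _ _ hqc]
          have hlenHC : mat.length ≤ (pvHC arr mat j).length := by
            rw [hHC]
            simp
            omega
          have hgetDt : (pvHC arr mat j).getD (mat.length - 1) 0 = t := by
            rw [hHC, show mat.length - 1 =
              ((List.range t).filter (pvQc (pvPosition mat mat.length (mat.headI).length) arr j)).length from by omega,
              pv_getD_concat]
          unfold pvCands
          apply List.mem_append_right
          apply List.mem_map.mpr
          refine ⟨pvHC arr mat j, List.mem_filter.mpr ⟨List.mem_map_of_mem (by simpa using hj), by simpa using hlenHC⟩, by rw [hgetDt]⟩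
      have hlec : ∀ c ∈ pvCands arr mat, (t : Int) ≤ c := by
        intro c hcmem
        unfold pvCands at hcmem
        rcases List.mem_append.mp hcmem with hc1 | hc1
        · rcases List.mem_map.mp hc1 with ⟨h, hhf, rfl⟩
          have hfl := List.mem_filter.mp hhf
          rcases List.mem_map.mp hfl.1 with ⟨i', hi', rfl⟩
          have hlen : (mat.headI).length ≤ (pvHR arr mat i').length := by simpa using hfl.2
          have hcols1 : 0 < (mat.headI).length := List.length_pos_iff.mpr hc0
          have := pv_getD_late (pvQr (pvPosition mat mat.length (mat.headI).length) arr i') arr.length t ((mat.headI).length - 1)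
            (le_of_lt ht) (by unfold pvHR at hlen; omega)
            (by have := hbr i' (by simpa using hi'); omega)
          exact_mod_cast this
        · rcases List.mem_map.mp hc1 with ⟨h, hhf, rfl⟩
          have hfl := List.mem_filter.mp hhf
          rcases List.mem_map.mp hfl.1 with ⟨j', hj', rfl⟩
          have hlen : mat.length ≤ (pvHC arr mat j').length := by simpa using hfl.2
          have hrows1 : 0 < mat.length := List.length_pos_iff.mpr hm
          have := pv_getD_late (pvQc (pvPosition mat mat.length (mat.headI).length) arr j') arr.length t (mat.length - 1)
            (le_of_lt ht) (by unfold pvHC at hlen; omega)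
            (by have := hbc j' (by simpa using hj'); omega)
          exact_mod_cast this
      exact (pv_minD_eq (pvCands arr mat) (t : Int) hmemc hlec).symm
    · rw [if_neg hfire]
      apply ih (t+1) _ _ (pv_drop_succ arr t v rest hdrop) (by simpa using hlr)
        (by simpa using hlc)
      · intro i' hi'
        by_cases hii : i = i'
        · subst hii
          exact hrp1
        · rw [pv_set_getD_ne _ _ _ _ _ hii, hir i' hi', pv_filter_range_succ_false]
          simp [pvQr, hvt, hget]
          exact hii
      · intro j' hj'
        by_cases hjj : j = j'
        · subst hjj
          exact hcp1
        · rw [pv_set_getD_ne _ _ _ _ _ hjj, hic j' hj', pv_filter_range_succ_false]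
          simp [pvQc, hvt, hget]
          exact hjj
      · intro i' hi'
        by_cases hii : i = i'
        · subst hii
          rw [hcr]
          have hb := hbr i hi'
          have hne : ((List.range (t+1)).filter (pvQr (pvPosition mat mat.length (mat.headI).length) arr i)).length ≠
              (mat.headI).length := by
            intro he
            exact hfire (Or.inl (by rw [hrp1, he]))
          rw [hcr] at hne
          omega
        · rw [pv_filter_range_succ_false]
          · exact hbr i' hi'
          · simp [pvQr, hvt, hget]
            exact hii
      · intro j' hj'
        by_cases hjj : j = j'
        · subst hjj
          rw [hcc]
          have hb := hbc j hj'
          have hne : ((List.range (t+1)).filter (pvQc (pvPosition mat mat.length (mat.headI).length) arr j)).length ≠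
              mat.length := by
            intro he
            exact hfire (Or.inr (by rw [hcp1, he]))
          rw [hcc] at hne
          omega
        · rw [pv_filter_range_succ_false]
          · exact hbc j' hj'
          · simp [pvQc, hvt, hget]
            exact hjj

-- ===== VERDICT (by name: the statement is the Claim_ definition above) =====
theorem firstCompleteIndex_spec : Claim_equal_firstCompleteIndex := by
  intro arr mat _ hPre
  obtain ⟨hm, hc0, hwide, harr⟩ := hPre
  show firstCompleteIndex arr mat = firstCompleteIndex_alt arr mat
  rw [pv_alt_eq arr mat hwide harr]
  exact pv_loop_spec arr mat hm hc0 hwide harr arr 0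
    (List.replicate mat.length 0) (List.replicate (mat.headI).length 0)
    List.drop_zero (by simp) (by simp)
    (fun i hi => by rw [pv_replicate_getD _ _ _ _ hi]; simp)
    (fun j hj => by rw [pv_replicate_getD _ _ _ _ hj]; simp)
    (fun i _ => by simpa using List.length_pos_iff.mpr hc0)
    (fun j _ => by simpa using List.length_pos_iff.mpr hm)
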